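-- pv_equiv track=rewrite | github.com/dmaynard24/project-euler | python/questions_001_100/question_085/counting_rectangles.py | get_closest_area
-- ===== SOURCE A (Python) =====
-- def get_rect_count(rect_w, rect_h):
--   count = 0
--
--   for w in range(1, rect_w + 1):
--     for h in range(1, rect_h + 1):
--       count += (rect_w - w + 1) * (rect_h - h + 1)
--
--   return count
--
-- def get_closest_area(target_count):
--   closest_area = None
--   smallest_diff = target_count
--
--   # max our width at 100
--   max_w = min(target_count // 2, 100)
--
--   for w in range(3, max_w):
--     for h in range(2, w + 1):
--       rect_count = get_rect_count(w, h)
--       diff = abs(target_count - rect_count)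
--       if diff < smallest_diff:
--         closest_area = w * h
--         smallest_diff = diff
--
--   return closest_area
-- ===== SOURCE B (Python) =====
-- def get_closest_area(target_count):
--     def tri(n):
--         return n * (n + 1) // 2
--
--     cands = [(abs(target_count - tri(w) * tri(h)), w * h)
--              for w in range(3, min(target_count // 2, 100))
--              for h in range(2, w + 1)]
--     if not cands:
--         return None
--     d, area = min(cands, key=lambda p: p[0])
--     return area if d < target_count else None
-- ===== Notes on version B (the rewrite author's own statement) =====
-- stated objective: faster
-- what changed: B replaces get_rect_count's nested double loop with the closed-form product of the two triangular numbers tri(w)*tri(h) and selects the answer as the first minimum-difference candidate of a flat candidate list instead of a mutable best-so-far scan.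
import Mathlib
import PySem

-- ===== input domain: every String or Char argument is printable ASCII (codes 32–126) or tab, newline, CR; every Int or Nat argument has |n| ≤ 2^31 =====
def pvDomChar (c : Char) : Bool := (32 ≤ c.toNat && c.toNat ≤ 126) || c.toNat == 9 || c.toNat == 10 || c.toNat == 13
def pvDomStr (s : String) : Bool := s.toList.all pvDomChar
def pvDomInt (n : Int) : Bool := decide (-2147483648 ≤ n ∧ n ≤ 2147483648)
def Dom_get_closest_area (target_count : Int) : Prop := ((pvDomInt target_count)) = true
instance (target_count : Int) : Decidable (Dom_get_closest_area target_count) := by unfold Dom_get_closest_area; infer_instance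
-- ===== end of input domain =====

-- B replaces A's inner double loop (get_rect_count) by the closed-form triangular-number
-- product and picks the best candidate with a first-minimum selection over a candidate list;
-- objective: faster (asymptotically fewer operations per candidate).


-- ===== PORT A =====
def get_rect_count (rect_w rect_h : Int) : Int :=
  (PySem.List.pyRange 1 (rect_w + 1) 1).foldl
    (fun count w =>
      (PySem.List.pyRange 1 (rect_h + 1) 1).foldl
        (fun count h => count + (rect_w - w + 1) * (rect_h - h + 1)) count)
    0

def get_closest_area (target_count : Int) : Option Int :=
  ((PySem.List.pyRange 3 (min (PySem.Int.floordiv target_count 2) 100) 1).foldl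
    (fun s w =>
      (PySem.List.pyRange 2 (w + 1) 1).foldl
        (fun (s : Option Int × Int) h =>
          let rect_count := get_rect_count w h
          let diff := |target_count - rect_count|
          if diff < s.2 then (some (w * h), diff) else s)
        s)
    (none, target_count)).1

-- ===== PORT B =====
def triB (n : Int) : Int := PySem.Int.floordiv (n * (n + 1)) 2

def get_closest_area_alt (target_count : Int) : Option Int :=
  match PySem.List.min?
      ((PySem.List.pyRange 3 (min (PySem.Int.floordiv target_count 2) 100) 1).flatMap
        (fun w =>
          (PySem.List.pyRange 2 (w + 1) 1).map
            (fun h => (|target_count - triB w * triB h|, w * h))))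
      (fun p => p.1) with
  | none => none
  | some m => if m.1 < target_count then some m.2 else none

-- ===== PRECONDITION & SPEC =====
def Spec_get_closest_area (target_count : Int) (out : Option Int) : Prop := out = get_closest_area_alt target_count
instance (target_count : Int) (out : Option Int) : Decidable (Spec_get_closest_area target_count out) := by unfold Spec_get_closest_area; infer_instance

-- ===== CLAIM (what is proved, stated in full; the proofs are below) =====
def Claim_equal_get_closest_area : Prop := ∀ (target_count : Int), Dom_get_closest_area target_count → Spec_get_closest_area target_count (get_closest_area target_count)

-- ===== LEMMAS AND PROOFS =====

lemma sub_sum (m : Nat) (c : Int) :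
    ((List.range m).map (fun k : Nat => c - (k : Int))).sum * 2 = (m : Int) * (2 * c - m + 1) := by
  induction m with
  | zero => simp
  | succ n ih =>
    rw [List.range_succ, List.map_append, List.sum_append]
    simp only [List.map_cons, List.map_nil, List.sum_cons, List.sum_nil]
    push_cast
    push_cast at ih
    nlinarith [ih]

lemma trisum (m : Nat) :
    ((PySem.List.pyRange 1 ((m : Int) + 1) 1).map (fun k => (m : Int) - k + 1)).sum * 2
      = (m : Int) * ((m : Int) + 1) := by
  rw [PySem.List.pyRange_one]
  have h1 : (((m : Int) + 1) - 1).toNat = m := by omega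
  rw [h1, List.map_map]
  have h2 : ((fun k => (m : Int) - k + 1) ∘ fun k : Nat => (1 : Int) + (k : Int))
      = fun k : Nat => (m : Int) - (k : Int) := by
    funext k; simp; ring
  rw [h2, sub_sum m (m : Int)]
  ring

lemma tri_two (m : Nat) : triB (m : Int) * 2 = (m : Int) * ((m : Int) + 1) := by
  unfold triB
  have h1 : ((m : Int)) * ((m : Int) + 1) = ((m * (m + 1) : Nat) : Int) := by push_cast; ring
  have h3 : PySem.Int.floordiv ((m * (m + 1) : Nat) : Int) 2 = (((m * (m + 1)) / 2 : Nat) : Int) := by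
    exact_mod_cast PySem.Int.floordiv_natCast (m * (m + 1)) 2
  rw [h1, h3]
  have h2 : (m * (m + 1)) / 2 * 2 = m * (m + 1) := by
    rcases Nat.even_mul_succ_self m with ⟨k, hk⟩
    omega
  exact_mod_cast congrArg (fun n : Nat => (n : Int)) h2

lemma rect_eq (w h : Int) (hw : 0 ≤ w) (hh : 0 ≤ h) :
    get_rect_count w h = triB w * triB h := by
  lift w to ℕ using hw with mw
  lift h to ℕ using hh with mh
  unfold get_rect_count
  have e1 : (PySem.List.pyRange 1 ((mw : Int) + 1) 1).foldl
        (fun count w =>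
          (PySem.List.pyRange 1 ((mh : Int) + 1) 1).foldl
            (fun count h => count + ((mw : Int) - w + 1) * ((mh : Int) - h + 1)) count)
        0
      = (PySem.List.pyRange 1 ((mw : Int) + 1) 1).foldl
          (fun count w =>
            count + ((PySem.List.pyRange 1 ((mh : Int) + 1) 1).map
              (fun hh => ((mw : Int) - w + 1) * ((mh : Int) - hh + 1))).sum)
          0 := by
    apply PySem.List.foldl_congr_mem
    intro acc x _
    exact PySem.List.foldl_add _ _ _
  rw [e1, PySem.List.foldl_add, zero_add]
  have e2 : (fun w : Int =>
      ((PySem.List.pyRange 1 ((mh : Int) + 1) 1).map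
        (fun hh => ((mw : Int) - w + 1) * ((mh : Int) - hh + 1))).sum)
      = (fun w : Int => ((mw : Int) - w + 1) * (((PySem.List.pyRange 1 ((mh : Int) + 1) 1).map
          (fun hh => (mh : Int) - hh + 1)).sum)) := by
    funext w
    rw [List.sum_map_mul_left]
  rw [e2, List.sum_map_mul_right]
  have hW := trisum mw
  have hH := trisum mh
  have t1 := tri_two mw
  have t2 := tri_two mh
  have h4 : (((PySem.List.pyRange 1 ((mw : Int) + 1) 1).map (fun k => (mw : Int) - k + 1)).sum)
      * (((PySem.List.pyRange 1 ((mh : Int) + 1) 1).map (fun k => (mh : Int) - k + 1)).sum) * 4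
      = triB (mw : Int) * triB (mh : Int) * 4 := by
    calc (((PySem.List.pyRange 1 ((mw : Int) + 1) 1).map (fun k => (mw : Int) - k + 1)).sum)
          * (((PySem.List.pyRange 1 ((mh : Int) + 1) 1).map (fun k => (mh : Int) - k + 1)).sum) * 4
        = ((((PySem.List.pyRange 1 ((mw : Int) + 1) 1).map (fun k => (mw : Int) - k + 1)).sum) * 2)
          * ((((PySem.List.pyRange 1 ((mh : Int) + 1) 1).map (fun k => (mh : Int) - k + 1)).sum) * 2) := by ring
      _ = ((mw : Int) * ((mw : Int) + 1)) * ((mh : Int) * ((mh : Int) + 1)) := by rw [hW, hH]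
      _ = (triB (mw : Int) * 2) * (triB (mh : Int) * 2) := by rw [t1, t2]
      _ = triB (mw : Int) * triB (mh : Int) * 4 := by ring
  exact mul_right_cancel₀ (b := (4 : Int)) (by norm_num) h4

-- the fold step of PySem.List.min? with key = Prod.fst, named
def minStep (acc : Option (Int × Int)) (x : Int × Int) : Option (Int × Int) :=
  match acc with
  | none => some x
  | some m => if x.1 < m.1 then some x else some m

lemma min?_foldl (xs : List (Int × Int)) :
    PySem.List.min? xs (fun p => p.1) = xs.foldl minStep none := by
  unfold PySem.List.min?
  apply PySem.List.foldl_congr_mem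
  intro acc x _
  cases acc <;> simp [minStep]

lemma min_fold_some (t : List (Int × Int)) (m : Int × Int) :
    t.foldl minStep (some m)
    = match PySem.List.min? t (fun p => p.1) with
      | none => some m
      | some m' => if m'.1 < m.1 then some m' else some m := by
  induction t generalizing m with
  | nil => simp [PySem.List.min?]
  | cons p t ih =>
    have hcons : PySem.List.min? (p :: t) (fun x : Int × Int => x.1)
        = t.foldl minStep (some p) := by
      rw [min?_foldl, List.foldl_cons]
      simp [minStep]
    rw [List.foldl_cons]
    have hstep : minStep (some m) p = if p.1 < m.1 then some p else some m := rfl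
    rw [hstep]
    by_cases hpm : p.1 < m.1
    · rw [if_pos hpm, ih p, hcons, ih p]
      cases hmin : PySem.List.min? t (fun p : Int × Int => p.1) with
      | none => simp [if_pos hpm]
      | some m' =>
        by_cases h1 : m'.1 < p.1
        · have h2 : m'.1 < m.1 := lt_trans h1 hpm
          simp [if_pos h1, if_pos h2]
        · simp [if_neg h1, if_pos hpm]
    · rw [if_neg hpm, ih m, hcons, ih p]
      cases hmin : PySem.List.min? t (fun p : Int × Int => p.1) with
      | none => simp [if_neg hpm]
      | some m' =>
        by_cases h1 : m'.1 < p.1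
        · simp [if_pos h1]
        · have h2 : ¬ m'.1 < m.1 := by omega
          simp [if_neg h1, if_neg hpm, if_neg h2]

lemma min?_cons_fst (p : Int × Int) (t : List (Int × Int)) :
    PySem.List.min? (p :: t) (fun x => x.1)
      = match PySem.List.min? t (fun x => x.1) with
        | none => some p
        | some m => if m.1 < p.1 then some m else some p := by
  have h : PySem.List.min? (p :: t) (fun x : Int × Int => x.1)
      = t.foldl minStep (some p) := by
    rw [min?_foldl, List.foldl_cons]
    simp [minStep]
  rw [h, min_fold_some]

-- A's running "update on strictly smaller diff" fold computes the first minimum of the list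
lemma fold_min (c : List (Int × Int)) (a0 : Option Int) (d0 : Int) :
    c.foldl (fun s p => if p.1 < s.2 then (some p.2, p.1) else s) (a0, d0)
      = match PySem.List.min? c (fun p => p.1) with
        | none => (a0, d0)
        | some m => if m.1 < d0 then (some m.2, m.1) else (a0, d0) := by
  induction c generalizing a0 d0 with
  | nil => simp [PySem.List.min?]
  | cons p t ih =>
    rw [min?_cons_fst, List.foldl_cons]
    by_cases hp : p.1 < d0
    · rw [if_pos hp, ih]
      cases hmin : PySem.List.min? t (fun p : Int × Int => p.1) with
      | none => simp [if_pos hp]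
      | some m' =>
        by_cases h1 : m'.1 < p.1
        · have h2 : m'.1 < d0 := lt_trans h1 hp
          simp [if_pos h1, if_pos h2]
        · simp [if_neg h1, if_pos hp]
    · rw [if_neg hp, ih]
      cases hmin : PySem.List.min? t (fun p : Int × Int => p.1) with
      | none => simp [if_neg hp]
      | some m' =>
        by_cases h1 : m'.1 < p.1
        · simp [if_pos h1]
        · have h2 : ¬ m'.1 < d0 := by omega
          simp [if_neg h1, if_neg hp, if_neg h2]

-- ===== VERDICT (by name: the statement is the Claim_ definition above) =====
theorem get_closest_area_spec : Claim_equal_get_closest_area := by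
  intro t _
  unfold Spec_get_closest_area get_closest_area get_closest_area_alt
  set maxw : Int := min (PySem.Int.floordiv t 2) 100 with hmaxw
  have hcong :
      (PySem.List.pyRange 3 maxw 1).foldl
        (fun s w =>
          (PySem.List.pyRange 2 (w + 1) 1).foldl
            (fun (s : Option Int × Int) h =>
              let rect_count := get_rect_count w h
              let diff := |t - rect_count|
              if diff < s.2 then (some (w * h), diff) else s)
            s)
        (none, t)
      = (PySem.List.pyRange 3 maxw 1).foldl
          (fun s w =>
            (PySem.List.pyRange 2 (w + 1) 1).foldl
              (fun (s : Option Int × Int) h =>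
                if |t - triB w * triB h| < s.2 then (some (w * h), |t - triB w * triB h|) else s)
              s)
          (none, t) := by
    apply PySem.List.foldl_congr_mem
    intro acc w hw
    apply PySem.List.foldl_congr_mem
    intro acc2 h hh
    have hw3 : 3 ≤ w := ((PySem.List.mem_pyRange_one).1 hw).1
    have hh2 : 2 ≤ h := ((PySem.List.mem_pyRange_one).1 hh).1
    have hr := rect_eq w h (by omega) (by omega)
    simp only [hr]
  rw [hcong]
  have hflat :
      (PySem.List.pyRange 3 maxw 1).foldl
        (fun s w =>
          (PySem.List.pyRange 2 (w + 1) 1).foldl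
            (fun (s : Option Int × Int) h =>
              if |t - triB w * triB h| < s.2 then (some (w * h), |t - triB w * triB h|) else s)
            s)
        (none, t)
      = ((PySem.List.pyRange 3 maxw 1).flatMap
          (fun w =>
            (PySem.List.pyRange 2 (w + 1) 1).map
              (fun h => (|t - triB w * triB h|, w * h)))).foldl
          (fun (s : Option Int × Int) p => if p.1 < s.2 then (some p.2, p.1) else s)
          (none, t) := by
    rw [List.foldl_flatMap]
    apply PySem.List.foldl_congr_mem
    intro acc w _
    rw [List.foldl_map]
  rw [hflat, fold_min]
  cases hmin : PySem.List.min?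
      ((PySem.List.pyRange 3 maxw 1).flatMap
        (fun w =>
          (PySem.List.pyRange 2 (w + 1) 1).map
            (fun h => (|t - triB w * triB h|, w * h))))
      (fun p : Int × Int => p.1) with
  | none => simp
  | some m =>
    by_cases hd : m.1 < t
    · simp [if_pos hd]
    · simp [if_neg hd]
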